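-- pv_equiv track=rewrite | github.com/Hendrix-CS/csci150 | lectures/S26/2026-02-25-Strings-and-Loops.py | insert_char
-- ===== SOURCE A (Python) =====
-- def insert_char(s: str, c: str, i: int) -> str:
--     j = 0
--     return_str = ''
--     while j < len(s):
--         if i == j:
--             return_str += c
--         return_str +=s[j]
--
--         j += 1
--
--     return return_str
-- ===== SOURCE B (Python) =====
-- def insert_char(s: str, c: str, i: int) -> str:
--     if 0 <= i < len(s):
--         return s[:i] + c + s[i:]
--     return s
-- ===== Notes on version B (the rewrite author's own statement) =====
-- stated objective: faster
-- what changed: Replaces the character-by-character while loop that rebuilds the string with a guarded closed-form slice-and-concatenate (s[:i] + c + s[i:] when 0 <= i < len(s), else s unchanged).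
import Mathlib
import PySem

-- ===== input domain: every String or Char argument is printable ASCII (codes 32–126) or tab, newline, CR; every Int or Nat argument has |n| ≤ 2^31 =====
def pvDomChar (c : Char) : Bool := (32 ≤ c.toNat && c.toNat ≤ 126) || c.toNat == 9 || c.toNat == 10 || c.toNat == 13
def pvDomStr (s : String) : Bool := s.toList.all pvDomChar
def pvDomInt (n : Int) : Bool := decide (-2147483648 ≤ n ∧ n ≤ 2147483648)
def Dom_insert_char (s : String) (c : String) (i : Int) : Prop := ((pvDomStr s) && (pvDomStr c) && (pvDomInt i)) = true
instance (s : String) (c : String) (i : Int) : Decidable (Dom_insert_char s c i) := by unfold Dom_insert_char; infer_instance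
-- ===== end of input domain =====

-- B replaces A's character-by-character accumulation loop with a guarded closed-form
-- slice-and-concatenate, avoiding quadratic repeated concatenation (objective: faster; measured).

-- ===== PORT A =====
-- the while loop: j counts up over the characters of s, inserting c when i == j
def insertCharLoop (cs : List Char) (c : List Char) (i j : Int) : List Char :=
  match cs with
  | [] => []
  | x :: rest => (if i == j then c else []) ++ x :: insertCharLoop rest c i (j + 1)

def insert_char (s : String) (c : String) (i : Int) : String :=
  String.ofList (insertCharLoop s.toList c.toList i 0)

-- ===== PORT B =====
def insert_char_alt (s : String) (c : String) (i : Int) : String :=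
  if 0 ≤ i ∧ i < (s.toList.length : Int) then
    String.ofList (PySem.List.slice s.toList none (some i) ++ c.toList ++
               PySem.List.slice s.toList (some i) none)
  else s

-- ===== PRECONDITION & SPEC =====
def Spec_insert_char (s : String) (c : String) (i : Int) (out : String) : Prop := out = insert_char_alt s c i
instance (s : String) (c : String) (i : Int) (out : String) : Decidable (Spec_insert_char s c i out) := by unfold Spec_insert_char; infer_instance

-- ===== CLAIM (what is proved, stated in full; the proofs are below) =====
def Claim_equal_insert_char : Prop := ∀ (s : String) (c : String) (i : Int), Dom_insert_char s c i → Spec_insert_char s c i (insert_char s c i)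

-- ===== LEMMAS AND PROOFS =====

-- the loop depends only on i - j
theorem insertCharLoop_shift (cs c : List Char) (i j : Int) :
    insertCharLoop cs c i j = insertCharLoop cs c (i - j) 0 := by
  induction cs generalizing i j with
  | nil => rfl
  | cons x rest ih =>
    simp only [insertCharLoop, zero_add]
    rw [ih i (j + 1), ih (i - j) 1]
    have h1 : i - (j + 1) = i - j - 1 := by ring
    have h2 : (i == j) = (i - j == 0) := by
      by_cases h : i = j
      · simp [h]
      · simp [h]; omega
    rw [h1, h2]

theorem insertCharLoop_closed (cs c : List Char) (i : Int) :
    insertCharLoop cs c i 0 =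
      if 0 ≤ i ∧ i < (cs.length : Int) then
        cs.take i.toNat ++ c ++ cs.drop i.toNat
      else cs := by
  induction cs generalizing i with
  | nil => simp [insertCharLoop]
  | cons x rest ih =>
    simp only [insertCharLoop, zero_add]
    rw [insertCharLoop_shift rest c i 1, ih (i - 1)]
    by_cases h0 : i = 0
    · subst h0; simp
    · have hbe : (i == (0 : Int)) = false := by simp [h0]
      rw [hbe]
      by_cases hin : 0 ≤ i ∧ i < ((x :: rest).length : Int)
      · have h1 : 0 < i := lt_of_le_of_ne hin.1 (Ne.symm h0)
        have h2 : 0 ≤ i - 1 ∧ i - 1 < (rest.length : Int) := by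
          simp at hin; omega
        rw [if_pos h2, if_pos hin]
        have ht : i.toNat = (i - 1).toNat + 1 := by omega
        rw [ht, List.take_succ_cons, List.drop_succ_cons]
        simp
      · have h2 : ¬ (0 ≤ i - 1 ∧ i - 1 < (rest.length : Int)) := by
          simp at hin ⊢; omega
        rw [if_neg h2, if_neg hin]
        simp

-- ===== VERDICT (by name: the statement is the Claim_ definition above) =====
theorem insert_char_spec : Claim_equal_insert_char := by
  intro s c i _
  unfold Spec_insert_char insert_char insert_char_alt
  rw [insertCharLoop_closed]
  by_cases h : 0 ≤ i ∧ i < (s.toList.length : Int)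
  · rw [if_pos h, if_pos h,
      PySem.List.slice_to s.toList h.1, PySem.List.slice_from s.toList h.1]
  · rw [if_neg h, if_neg h]
    simp
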